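-- pv_equiv track=rewrite | github.com/YZY-stack/multi-spec-elucidation | spectromol/inference_temperature_sampling.py | apply_constraints_for_temperature_sampling
-- ===== SOURCE A (Python) =====
-- def apply_constraints_for_temperature_sampling(candidate_seq, char2idx, idx2char, required_atom_counts):
--     """
--     apply constraints to the candidate sequence for temperature sampling
--     """
--     # remove <PAD>,<SOS>,<EOS> from candidate_seq
--     seq_chars = []
--     for t in candidate_seq:
--         if t == char2idx['<EOS>']:
--             break
--         if t not in [char2idx['<PAD>'], char2idx['<SOS>']]:
--             seq_chars.append(idx2char[t])
--
--     # initialize valid_tokens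
--     vocab_size = len(idx2char)
--     valid_tokens = [True] * vocab_size
--
--     current_atom_counts = {'C':0,'N':0,'O':0,'F':0}
--     for tok in seq_chars:
--         if tok in current_atom_counts:
--             current_atom_counts[tok] += 1
--
--     # check if current atom counts meet the required counts
--     for atom, req_count in required_atom_counts.items():
--         if current_atom_counts[atom] >= req_count:
--             a_idx = char2idx[atom]
--             valid_tokens[a_idx] = False
--
--     # make sure the sequence does not end with an open parenthesis '('
--     open_p = seq_chars.count('(')
--     close_p = seq_chars.count(')')
--     if close_p >= open_p:
--         # cannot end with ')'
--         rp_idx = char2idx.get(')', None)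
--         if rp_idx is not None:
--             valid_tokens[rp_idx] = False
--
--     # make sure the sequence does not end with a hash '#' or equal '='
--     if len(seq_chars) > 0 and seq_chars[-1] in ['#','=']:
--         # cannot end with '#' or '='
--         hash_idx = char2idx['#']
--         eq_idx = char2idx['=']
--         valid_tokens[hash_idx] = False
--         valid_tokens[eq_idx] = False
--
--     return valid_tokens
-- ===== SOURCE B (Python) =====
-- def apply_constraints_for_temperature_sampling(candidate_seq, char2idx, idx2char, required_atom_counts):
--     """
--     apply constraints to the candidate sequence for temperature sampling
--     (single fused pass over candidate_seq; no intermediate seq_chars list)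
--     """
--     eos = char2idx.get('<EOS>')
--     pad = char2idx.get('<PAD>')
--     sos = char2idx.get('<SOS>')
--
--     counts = {'C': 0, 'N': 0, 'O': 0, 'F': 0}
--     open_p = 0
--     close_p = 0
--     last = None
--     for t in candidate_seq:
--         if t == eos:
--             break
--         if t == pad or t == sos:
--             continue
--         ch = idx2char[t]
--         if ch in counts:
--             counts[ch] += 1
--         elif ch == '(':
--             open_p += 1
--         elif ch == ')':
--             close_p += 1
--         last = ch
--
--     valid_tokens = [True] * len(idx2char)
--
--     for atom, req_count in required_atom_counts.items():
--         if counts[atom] >= req_count: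
--             valid_tokens[char2idx[atom]] = False
--
--     if close_p >= open_p:
--         rp_idx = char2idx.get(')', None)
--         if rp_idx is not None:
--             valid_tokens[rp_idx] = False
--
--     if last in ('#', '='):
--         valid_tokens[char2idx['#']] = False
--         valid_tokens[char2idx['=']] = False
--
--     return valid_tokens
-- ===== Notes on version B (the rewrite author's own statement) =====
-- stated objective: alternative
-- what changed: B replaces A's materialised seq_chars list and its four separate follow-up passes (counting fold, two .count scans, last-element probe) by one fused single pass over candidate_seq that maintains the atom-count dict, the two parenthesis counters and the last decoded char directly, looking up the special tokens once with .get.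
import Mathlib
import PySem

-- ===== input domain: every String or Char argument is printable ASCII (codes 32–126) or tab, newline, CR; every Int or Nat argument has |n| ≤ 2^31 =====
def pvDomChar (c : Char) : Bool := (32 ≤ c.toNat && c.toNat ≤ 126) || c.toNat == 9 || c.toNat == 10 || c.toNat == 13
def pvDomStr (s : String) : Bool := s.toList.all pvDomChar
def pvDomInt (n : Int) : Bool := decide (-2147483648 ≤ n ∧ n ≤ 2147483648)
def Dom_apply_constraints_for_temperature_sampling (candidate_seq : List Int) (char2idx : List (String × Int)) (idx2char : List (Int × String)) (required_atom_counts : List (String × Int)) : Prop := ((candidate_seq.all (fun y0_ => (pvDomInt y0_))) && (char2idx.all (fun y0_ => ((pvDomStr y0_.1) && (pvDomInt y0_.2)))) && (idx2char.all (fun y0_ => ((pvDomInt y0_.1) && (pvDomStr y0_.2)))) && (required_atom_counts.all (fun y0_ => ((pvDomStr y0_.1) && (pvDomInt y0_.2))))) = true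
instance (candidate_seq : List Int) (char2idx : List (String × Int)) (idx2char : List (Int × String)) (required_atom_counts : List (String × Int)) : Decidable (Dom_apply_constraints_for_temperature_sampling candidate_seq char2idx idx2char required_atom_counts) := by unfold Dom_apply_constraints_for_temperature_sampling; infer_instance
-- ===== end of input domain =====

-- B fuses A's five passes (build seq_chars, count atoms, two .count scans, last-element probe)
-- into one single pass over candidate_seq that never materialises seq_chars (objective: alternative).

-- ===== PORT A =====
-- first loop of A: break at <EOS>, skip <PAD>/<SOS>, decode via idx2char
def pvSeqCharsA (eosV padV sosV : Int) (i2c : PySem.Dict Int String) : List Int → List String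
  | [] => []
  | t :: rest =>
    if t = eosV then []
    else if t = padV ∨ t = sosV then pvSeqCharsA eosV padV sosV i2c rest
    else i2c.getD t "" :: pvSeqCharsA eosV padV sosV i2c rest

def apply_constraints_for_temperature_sampling (candidate_seq : List Int) (char2idx : List (String × Int)) (idx2char : List (Int × String)) (required_atom_counts : List (String × Int)) : List Bool :=
  let c2i : PySem.Dict String Int := PySem.Dict.mk char2idx
  let i2c : PySem.Dict Int String := PySem.Dict.mk idx2char
  let seq_chars := pvSeqCharsA (c2i.getD "<EOS>" 0) (c2i.getD "<PAD>" 0) (c2i.getD "<SOS>" 0) i2c candidate_seq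
  let valid0 : List Bool := List.replicate idx2char.length true
  let counts := seq_chars.foldl (fun d tok => if d.contains tok then d.modify tok 0 (· + 1) else d)
      (PySem.Dict.mk [("C", (0 : Int)), ("N", 0), ("O", 0), ("F", 0)])
  let valid1 := required_atom_counts.foldl
      (fun v p => if counts.getD p.1 0 ≥ p.2 then PySem.List.pySetD v (c2i.getD p.1 0) false else v) valid0
  let open_p : Int := PySem.List.count seq_chars "("
  let close_p : Int := PySem.List.count seq_chars ")"
  let valid2 := if close_p ≥ open_p then
      match c2i.get? ")" with
      | some rp => PySem.List.pySetD valid1 rp false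
      | none => valid1
    else valid1
  if 0 < seq_chars.length ∧ PySem.List.pyGetD seq_chars (-1) "" ∈ (["#", "="] : List String) then
    PySem.List.pySetD (PySem.List.pySetD valid2 (c2i.getD "#" 0) false) (c2i.getD "=" 0) false
  else valid2

-- ===== PORT B =====
-- B's single fused pass: state = (atom counts, open_p, close_p, last decoded char)
def pvScanB (eosO padO sosO : Option Int) (i2c : PySem.Dict Int String) :
    List Int → PySem.Dict String Int × Int × Int × Option String → PySem.Dict String Int × Int × Int × Option String
  | [], st => st
  | t :: rest, (d, o, c, l) =>
    if some t = eosO then (d, o, c, l)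
    else if some t = padO ∨ some t = sosO then pvScanB eosO padO sosO i2c rest (d, o, c, l)
    else
      let ch := i2c.getD t ""
      if d.contains ch then pvScanB eosO padO sosO i2c rest (d.modify ch 0 (· + 1), o, c, some ch)
      else if ch = "(" then pvScanB eosO padO sosO i2c rest (d, o + 1, c, some ch)
      else if ch = ")" then pvScanB eosO padO sosO i2c rest (d, o, c + 1, some ch)
      else pvScanB eosO padO sosO i2c rest (d, o, c, some ch)

def apply_constraints_for_temperature_sampling_alt (candidate_seq : List Int) (char2idx : List (String × Int)) (idx2char : List (Int × String)) (required_atom_counts : List (String × Int)) : List Bool :=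
  let c2i : PySem.Dict String Int := PySem.Dict.mk char2idx
  let i2c : PySem.Dict Int String := PySem.Dict.mk idx2char
  match pvScanB (c2i.get? "<EOS>") (c2i.get? "<PAD>") (c2i.get? "<SOS>") i2c candidate_seq
      (PySem.Dict.mk [("C", (0 : Int)), ("N", 0), ("O", 0), ("F", 0)], 0, 0, none) with
  | (counts, open_p, close_p, last) =>
    let valid0 : List Bool := List.replicate idx2char.length true
    let valid1 := required_atom_counts.foldl
        (fun v p => if counts.getD p.1 0 ≥ p.2 then PySem.List.pySetD v (c2i.getD p.1 0) false else v) valid0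
    let valid2 := if close_p ≥ open_p then
        match c2i.get? ")" with
        | some rp => PySem.List.pySetD valid1 rp false
        | none => valid1
      else valid1
    if last = some "#" ∨ last = some "=" then
      PySem.List.pySetD (PySem.List.pySetD valid2 (c2i.getD "#" 0) false) (c2i.getD "=" 0) false
    else valid2

-- ===== PRECONDITION & SPEC =====
-- Pre_ is exactly the inputs on which the Python A returns normally: every key A looks up exists
-- (<EOS> once the loop runs, <PAD>/<SOS> once a pre-<EOS> token exists, idx2char for every kept token,
-- an atom of required_atom_counts is one of C/N/O/F, and every index actually written is in range).
def Pre_apply_constraints_for_temperature_sampling (candidate_seq : List Int) (char2idx : List (String × Int)) (idx2char : List (Int × String)) (required_atom_counts : List (String × Int)) : Prop :=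
  let d := PySem.Dict.mk char2idx
  let i2cd := PySem.Dict.mk idx2char
  let pre := candidate_seq.takeWhile (fun t => t ≠ d.getD "<EOS>" 0)
  let kept := pre.filter (fun t => ¬(t = d.getD "<PAD>" 0 ∨ t = d.getD "<SOS>" 0))
  let S := kept.map (fun t => i2cd.getD t "")
  (candidate_seq ≠ [] → d.contains "<EOS>" = true) ∧
  (pre ≠ [] → d.contains "<PAD>" = true ∧ d.contains "<SOS>" = true) ∧
  (∀ t ∈ kept, i2cd.contains t = true) ∧
  (∀ p ∈ required_atom_counts, p.1 ∈ (["C", "N", "O", "F"] : List String) ∧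
    (p.2 ≤ (PySem.List.count S p.1 : Int) →
      d.contains p.1 = true ∧ PySem.Raise.InRange idx2char.length (d.getD p.1 0))) ∧
  (PySem.List.count S "(" ≤ PySem.List.count S ")" →
    d.contains ")" = true → PySem.Raise.InRange idx2char.length (d.getD ")" 0)) ∧
  ((S.getLast? = some "#" ∨ S.getLast? = some "=") →
    d.contains "#" = true ∧ d.contains "=" = true ∧
    PySem.Raise.InRange idx2char.length (d.getD "#" 0) ∧
    PySem.Raise.InRange idx2char.length (d.getD "=" 0))
instance (candidate_seq : List Int) (char2idx : List (String × Int)) (idx2char : List (Int × String)) (required_atom_counts : List (String × Int)) : Decidable (Pre_apply_constraints_for_temperature_sampling candidate_seq char2idx idx2char required_atom_counts) := by unfold Pre_apply_constraints_for_temperature_sampling; infer_instance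

def pvWitness_apply_constraints_for_temperature_sampling : List Int × (List (String × Int)) × (List (Int × String)) × (List (String × Int)) :=
  ([3, 0, 4], [("<EOS>", 0), ("<PAD>", 1), ("<SOS>", 2), ("C", 3), ("N", 4)], [(0, "<EOS>"), (1, "<PAD>"), (2, "<SOS>"), (3, "C"), (4, "N")], [("C", 1), ("N", 2)])

def Spec_apply_constraints_for_temperature_sampling (candidate_seq : List Int) (char2idx : List (String × Int)) (idx2char : List (Int × String)) (required_atom_counts : List (String × Int)) (out : List Bool) : Prop := out = apply_constraints_for_temperature_sampling_alt candidate_seq char2idx idx2char required_atom_counts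
instance (candidate_seq : List Int) (char2idx : List (String × Int)) (idx2char : List (Int × String)) (required_atom_counts : List (String × Int)) (out : List Bool) : Decidable (Spec_apply_constraints_for_temperature_sampling candidate_seq char2idx idx2char required_atom_counts out) := by unfold Spec_apply_constraints_for_temperature_sampling; infer_instance

-- ===== CLAIM (what is proved, stated in full; the proofs are below) =====
def Claim_equal_apply_constraints_for_temperature_sampling : Prop := ∀ (candidate_seq : List Int) (char2idx : List (String × Int)) (idx2char : List (Int × String)) (required_atom_counts : List (String × Int)), Dom_apply_constraints_for_temperature_sampling candidate_seq char2idx idx2char required_atom_counts → Pre_apply_constraints_for_temperature_sampling candidate_seq char2idx idx2char required_atom_counts → Spec_apply_constraints_for_temperature_sampling candidate_seq char2idx idx2char required_atom_counts (apply_constraints_for_temperature_sampling candidate_seq char2idx idx2char required_atom_counts)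

-- ===== LEMMAS AND PROOFS =====

-- B's per-character step, applied to A's decoded characters
def pvStepB (st : PySem.Dict String Int × Int × Int × Option String) (ch : String) :
    PySem.Dict String Int × Int × Int × Option String :=
  match st with
  | (d, o, c, l) =>
    if d.contains ch then (d.modify ch 0 (· + 1), o, c, some ch)
    else if ch = "(" then (d, o + 1, c, some ch)
    else if ch = ")" then (d, o, c + 1, some ch)
    else (d, o, c, some ch)

lemma pvScanB_eq_foldl (eosV padV sosV : Int) (i2c : PySem.Dict Int String)
    (cs : List Int) (st : PySem.Dict String Int × Int × Int × Option String) :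
    pvScanB (some eosV) (some padV) (some sosV) i2c cs st =
      (pvSeqCharsA eosV padV sosV i2c cs).foldl pvStepB st := by
  induction cs generalizing st with
  | nil => rfl
  | cons t rest ih =>
    obtain ⟨d, o, c, l⟩ := st
    by_cases h1 : t = eosV
    · simp [pvScanB, pvSeqCharsA, h1]
    · by_cases h2 : t = padV ∨ t = sosV
      · simp [pvScanB, pvSeqCharsA, h1, h2, ih]
      · simp only [pvScanB, pvSeqCharsA, Option.some.injEq, if_neg h1, if_neg h2, List.foldl_cons]
        simp only [pvStepB]
        split
        · exact ih _
        · split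
          · exact ih _
          · split
            · exact ih _
            · exact ih _

lemma pvFoldB_components (L : List String) (d : PySem.Dict String Int) (o c : Int) (l : Option String)
    (h1 : d.contains "(" = false) (h2 : d.contains ")" = false) :
    L.foldl pvStepB (d, o, c, l) =
      (L.foldl (fun d tok => if d.contains tok then d.modify tok 0 (· + 1) else d) d,
       o + (PySem.List.count L "(" : Int), c + (PySem.List.count L ")" : Int),
       (L.getLast?).or l) := by
  induction L generalizing d o c l with
  | nil => simp
  | cons x xs ih =>
    have hx : pvStepB (d, o, c, l) x =
        ((if d.contains x then d.modify x 0 (· + 1) else d),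
         o + (if x = "(" then (1 : Int) else 0), c + (if x = ")" then (1 : Int) else 0), some x) := by
      by_cases hc : d.contains x
      · have hne1 : x ≠ "(" := by rintro rfl; rw [hc] at h1; exact absurd h1 (by simp)
        have hne2 : x ≠ ")" := by rintro rfl; rw [hc] at h2; exact absurd h2 (by simp)
        simp [pvStepB, hc, hne1, hne2]
      · by_cases hp : x = "("
        · simp [pvStepB, hp, h1]
        · by_cases hq : x = ")"
          · simp [pvStepB, hq, h2]
          · simp [pvStepB, hc, hp, hq]
    have h1' : (if d.contains x then d.modify x 0 (· + 1) else d).contains "(" = false := by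
      by_cases hc : d.contains x
      · have hne1 : "(" ≠ x := by rintro rfl; rw [hc] at h1; exact absurd h1 (by simp)
        simp [hc, PySem.Dict.contains_modify, hne1, h1]
      · simp [hc, h1]
    have h2' : (if d.contains x then d.modify x 0 (· + 1) else d).contains ")" = false := by
      by_cases hc : d.contains x
      · have hne2 : ")" ≠ x := by rintro rfl; rw [hc] at h2; exact absurd h2 (by simp)
        simp [hc, PySem.Dict.contains_modify, hne2, h2]
      · simp [hc, h2]
    rw [List.foldl_cons, hx, ih _ _ _ _ h1' h2']
    have hlast : (x :: xs).getLast?.or l = xs.getLast?.or (some x) := by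
      cases xs with
      | nil => rfl
      | cons y ys =>
        cases hz : (y :: ys).getLast? with
        | none => simp at hz
        | some z => simp [List.getLast?_cons_cons, hz]
    rw [hlast]
    simp only [Prod.mk.injEq]
    refine ⟨rfl, ?_, ?_, trivial⟩
    · by_cases hp : x = "(" <;>
        simp [PySem.List.count, hp]; omega
    · by_cases hq : x = ")" <;>
        simp [PySem.List.count, hq]; omega

-- the mask-building tail: A's tail on seq_chars = L equals B's tail on the fold components
lemma pvMask_eq (L : List String) (c2i : PySem.Dict String Int) (n : Nat) (req : List (String × Int)) :
    (let valid0 : List Bool := List.replicate n true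
     let counts := L.foldl (fun d tok => if d.contains tok then d.modify tok 0 (· + 1) else d)
        (PySem.Dict.mk [("C", (0 : Int)), ("N", 0), ("O", 0), ("F", 0)])
     let valid1 := req.foldl
        (fun v p => if counts.getD p.1 0 ≥ p.2 then PySem.List.pySetD v (c2i.getD p.1 0) false else v) valid0
     let open_p : Int := PySem.List.count L "("
     let close_p : Int := PySem.List.count L ")"
     let valid2 := if close_p ≥ open_p then
        match c2i.get? ")" with
        | some rp => PySem.List.pySetD valid1 rp false
        | none => valid1
       else valid1
     if 0 < L.length ∧ PySem.List.pyGetD L (-1) "" ∈ (["#", "="] : List String) then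
       PySem.List.pySetD (PySem.List.pySetD valid2 (c2i.getD "#" 0) false) (c2i.getD "=" 0) false
     else valid2) =
    (match (L.foldl (fun d tok => if d.contains tok then d.modify tok 0 (· + 1) else d)
        (PySem.Dict.mk [("C", (0 : Int)), ("N", 0), ("O", 0), ("F", 0)]),
        (0 : Int) + (PySem.List.count L "(" : Int), (0 : Int) + (PySem.List.count L ")" : Int),
        (L.getLast?).or none) with
     | (counts, open_p, close_p, last) =>
       let valid0 : List Bool := List.replicate n true
       let valid1 := req.foldl
          (fun v p => if counts.getD p.1 0 ≥ p.2 then PySem.List.pySetD v (c2i.getD p.1 0) false else v) valid0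
       let valid2 := if close_p ≥ open_p then
          match c2i.get? ")" with
          | some rp => PySem.List.pySetD valid1 rp false
          | none => valid1
         else valid1
       if last = some "#" ∨ last = some "=" then
         PySem.List.pySetD (PySem.List.pySetD valid2 (c2i.getD "#" 0) false) (c2i.getD "=" 0) false
       else valid2) := by
  simp only [Int.zero_add, Option.or_none]
  have hcond : (0 < L.length ∧ PySem.List.pyGetD L (-1) "" ∈ (["#", "="] : List String)) ↔
      (L.getLast? = some "#" ∨ L.getLast? = some "=") := by
    cases hL : L with
    | nil => simp
    | cons y ys =>
      have hne : (y :: ys) ≠ ([] : List String) := by simp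
      rw [PySem.List.pyGetD_neg_one _ _ hne, List.getLast?_eq_some_getLast (h := hne)]
      simp
  exact if_congr hcond rfl rfl

theorem apply_constraints_for_temperature_sampling_spec : Claim_equal_apply_constraints_for_temperature_sampling := by
  intro cs c2iL i2cL req _hdom hpre
  unfold Spec_apply_constraints_for_temperature_sampling
  simp only [Pre_apply_constraints_for_temperature_sampling] at hpre
  obtain ⟨h1, h2, -, -, -, -⟩ := hpre
  have hscan : pvScanB ((PySem.Dict.mk c2iL).get? "<EOS>") ((PySem.Dict.mk c2iL).get? "<PAD>")
      ((PySem.Dict.mk c2iL).get? "<SOS>") (PySem.Dict.mk i2cL) cs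
      (PySem.Dict.mk [("C", (0 : Int)), ("N", 0), ("O", 0), ("F", 0)], 0, 0, none) =
      (pvSeqCharsA ((PySem.Dict.mk c2iL).getD "<EOS>" 0) ((PySem.Dict.mk c2iL).getD "<PAD>" 0)
        ((PySem.Dict.mk c2iL).getD "<SOS>" 0) (PySem.Dict.mk i2cL) cs).foldl pvStepB
      (PySem.Dict.mk [("C", (0 : Int)), ("N", 0), ("O", 0), ("F", 0)], 0, 0, none) := by
    cases cs with
    | nil => rfl
    | cons t rest =>
      have he : (PySem.Dict.mk c2iL).contains "<EOS>" = true := h1 (by simp)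
      obtain ⟨ve, hve⟩ : ∃ v, (PySem.Dict.mk c2iL).get? "<EOS>" = some v := by
        rw [PySem.Dict.contains_eq_isSome_get?] at he
        exact Option.isSome_iff_exists.mp he
      have heD : (PySem.Dict.mk c2iL).getD "<EOS>" 0 = ve := by
        rw [PySem.Dict.getD_eq_get?_getD, hve]; rfl
      by_cases ht : t = (PySem.Dict.mk c2iL).getD "<EOS>" 0
      · rw [heD] at ht
        simp [pvScanB, pvSeqCharsA, hve, heD, ht]
      · have hpre_ne : (t :: rest).takeWhile
            (fun t => t ≠ (PySem.Dict.mk c2iL).getD "<EOS>" 0) ≠ [] := by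
          simp [ht]
        obtain ⟨hp, hs⟩ := h2 hpre_ne
        obtain ⟨vp, hvp⟩ : ∃ v, (PySem.Dict.mk c2iL).get? "<PAD>" = some v := by
          rw [PySem.Dict.contains_eq_isSome_get?] at hp
          exact Option.isSome_iff_exists.mp hp
        obtain ⟨vs, hvs⟩ : ∃ v, (PySem.Dict.mk c2iL).get? "<SOS>" = some v := by
          rw [PySem.Dict.contains_eq_isSome_get?] at hs
          exact Option.isSome_iff_exists.mp hs
        have hpD : (PySem.Dict.mk c2iL).getD "<PAD>" 0 = vp := by
          rw [PySem.Dict.getD_eq_get?_getD, hvp]; rfl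
        have hsD : (PySem.Dict.mk c2iL).getD "<SOS>" 0 = vs := by
          rw [PySem.Dict.getD_eq_get?_getD, hvs]; rfl
        rw [hve, hvp, hvs, heD, hpD, hsD]
        exact pvScanB_eq_foldl ve vp vs _ _ _
  simp only [apply_constraints_for_temperature_sampling,
    apply_constraints_for_temperature_sampling_alt]
  rw [hscan, pvFoldB_components _ _ _ _ _ (by decide) (by decide)]
  exact pvMask_eq _ _ _ _
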